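-- pv_equiv track=rewrite | github.com/sangpyeong/codingtest | 프로그래머스/프로세스.py | solution
-- ===== SOURCE A (Python) =====
-- from collections import deque
--
-- def solution(priorities, location):
--     answer = 0
--     q = deque()
--     for i in range(len(priorities)):
--         q.append([priorities[i], i])
--
--     for j in range(len(q)):
--         #큐 정렬
--         for i in range(len(q)):
--             priorlist = [i[0] for i in q]
--             if max(priorlist) != q[0][0]:
--                 tmp = q.popleft()
--                 q.append(tmp)
--         #프로세스 실행
--         process = q.popleft()
--         answer+=1
--         if process[1] == location:
--             break
--
--     return answer
-- ===== SOURCE B (Python) =====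
-- def solution(priorities, location):
--     # Single loop: instead of rotating the queue one step at a time, jump
--     # straight to the first maximum-priority element and rotate by slicing.
--     q = list(enumerate(priorities))
--     answer = 0
--     while q:
--         m = max(p for _, p in q)
--         k = next(j for j, (_, p) in enumerate(q) if p == m)
--         i = q[k][0]
--         q = q[k + 1:] + q[:k]
--         answer += 1
--         if i == location:
--             break
--     return answer
-- ===== Notes on version B (the rewrite author's own statement) =====
-- stated objective: faster
-- what changed: Replaces the deque simulation (n one-step rotations per pop, each recomputing the max of the whole queue) by a single loop that computes the max once per pop, jumps directly to the first maximum element and rotates the list by one slicing operation.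
import Mathlib
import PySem

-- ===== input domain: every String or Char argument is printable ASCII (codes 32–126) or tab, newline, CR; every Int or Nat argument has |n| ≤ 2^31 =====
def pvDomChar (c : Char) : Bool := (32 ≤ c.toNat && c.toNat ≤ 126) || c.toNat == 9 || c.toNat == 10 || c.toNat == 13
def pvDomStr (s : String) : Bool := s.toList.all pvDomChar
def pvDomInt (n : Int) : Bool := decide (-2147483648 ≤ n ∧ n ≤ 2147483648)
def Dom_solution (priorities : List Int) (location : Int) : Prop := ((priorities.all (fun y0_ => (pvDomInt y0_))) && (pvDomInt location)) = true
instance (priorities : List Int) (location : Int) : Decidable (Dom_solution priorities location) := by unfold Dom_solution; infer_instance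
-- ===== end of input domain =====

-- B replaces A's deque simulation (one-step rotations, each recomputing the max of the whole queue)
-- by computing the max once per pop and rotating directly to the first maximum via slicing (faster).


-- ===== PORT A =====
-- one iteration of A's inner "queue sort" loop: if max(priorlist) != q[0][0], rotate by one
def pvRot (q : List (Int × Int)) : List (Int × Int) :=
  match q with
  | [] => []  -- unreachable: pvRot is only applied to the queue of the inner loop, which is nonempty
  | x :: rest =>
      if PySem.List.max? ((x :: rest).map Prod.fst) (fun y => y) ≠ some x.1 then rest ++ [x]
      else x :: rest

-- A's inner loop: `for i in range(len(q)): …`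
def pvSort (q : List (Int × Int)) : List (Int × Int) :=
  (List.range q.length).foldl (fun acc _ => pvRot acc) q

-- A's outer loop: `for j in range(len(q)): …` with the break; fuel = the initial len(q)
def pvOuter : Nat → List (Int × Int) → Int → Int → Int
  | 0, _, _, answer => answer
  | fuel + 1, q, location, answer =>
      match pvSort q with
      | [] => answer  -- unreachable (popleft of the empty deque): the queue holds fuel + 1 elements
      | process :: rest =>
          if process.2 == location then answer + 1
          else pvOuter fuel rest location (answer + 1)

def solution (priorities : List Int) (location : Int) : Int :=
  -- q = deque of [priorities[i], i] pairs; i ranges over range(len(priorities)), so pyGetD is exact here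
  let q := (PySem.List.pyRange 0 (priorities.length : Int) 1).foldl
      (fun acc i => acc ++ [(PySem.List.pyGetD priorities i 0, i)]) ([] : List (Int × Int))
  pvOuter priorities.length q location 0

-- ===== PORT B =====
-- B's `while q:` loop; the queue holds (index, priority) pairs; fuel = len(priorities) bounds the pops
def pvAltLoop : Nat → List (Int × Int) → Int → Int → Int
  | 0, _, _, answer => answer
  | fuel + 1, q, location, answer =>
      match q with
      | [] => answer
      | _ :: _ =>
          let m := (PySem.List.max? (q.map Prod.snd) (fun y => y)).getD 0  -- max(p for _, p in q); q ≠ []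
          let k := q.findIdx (fun x => x.2 == m)                           -- next(j …): first index with p == m
          let i := (q.getD k (0, 0)).1                                     -- q[k][0]; exact: k < len(q) since m ∈ q
          let q' := q.drop (k + 1) ++ q.take k                             -- q[k+1:] + q[:k]; exact: 0 ≤ k < len(q)
          if i == location then answer + 1 else pvAltLoop fuel q' location (answer + 1)

def solution_alt (priorities : List Int) (location : Int) : Int :=
  pvAltLoop priorities.length (PySem.List.enumerate priorities 0) location 0

-- ===== PRECONDITION & SPEC =====
def Spec_solution (priorities : List Int) (location : Int) (out : Int) : Prop := out = solution_alt priorities location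
instance (priorities : List Int) (location : Int) (out : Int) : Decidable (Spec_solution priorities location out) := by unfold Spec_solution; infer_instance

-- ===== CLAIM (what is proved, stated in full; the proofs are below) =====
def Claim_equal_solution : Prop := ∀ (priorities : List Int) (location : Int), Dom_solution priorities location → Spec_solution priorities location (solution priorities location)

-- ===== LEMMAS AND PROOFS =====

-- rotation of the queue by k places: A reaches it one step at a time, B by slicing
def pvRotate (q : List (Int × Int)) (k : Nat) : List (Int × Int) := q.drop k ++ q.take k

lemma pvRotate_perm (q : List (Int × Int)) (k : Nat) : (pvRotate q k).Perm q :=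
  (List.perm_append_comm).trans (by rw [List.take_append_drop])

-- the max VALUE (key = id, over Int) is invariant under permutation
lemma pvMax_perm {l l' : List Int} (h : l.Perm l') :
    PySem.List.max? l (fun y => y) = PySem.List.max? l' (fun y => y) := by
  match h1 : PySem.List.max? l (fun y => y), h2 : PySem.List.max? l' (fun y => y) with
  | none, none => rfl
  | none, some m =>
      rw [PySem.List.max?_eq_none_iff] at h1
      rw [(h1 ▸ h : ([] : List Int).Perm l').symm.eq_nil] at h2
      simp [PySem.List.max?] at h2
  | some m, none =>
      rw [PySem.List.max?_eq_none_iff] at h2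
      rw [(h2 ▸ h.symm : ([] : List Int).Perm l).symm.eq_nil] at h1
      simp [PySem.List.max?] at h1
  | some m, some m' =>
      have hm := PySem.List.max?_mem h1
      have hm' := PySem.List.max?_mem h2
      have := PySem.List.max?_isMax h1 m' (h.mem_iff.mpr hm')
      have := PySem.List.max?_isMax h2 m (h.mem_iff.mp hm)
      simp only [Option.some.injEq]
      omega

lemma pvRotate_eq_cons (q : List (Int × Int)) (k : Nat) (hk : k < q.length) :
    pvRotate q k = q[k] :: (q.drop (k + 1) ++ q.take k) := by
  unfold pvRotate; rw [List.drop_eq_getElem_cons hk]; rfl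

lemma pvMax_rotate (q : List (Int × Int)) (j : Nat) :
    PySem.List.max? ((pvRotate q j).map Prod.fst) (fun y => y)
      = PySem.List.max? (q.map Prod.fst) (fun y => y) :=
  pvMax_perm ((pvRotate_perm q j).map Prod.fst)

-- one pvRot step advances the rotation while the front is not maximal …
lemma pvRot_rotate_step (q : List (Int × Int)) (m : Int)
    (hm : PySem.List.max? (q.map Prod.fst) (fun y => y) = some m)
    (j : Nat) (hj : j < q.length) (hne : q[j].1 ≠ m) :
    pvRot (pvRotate q j) = pvRotate q (j + 1) := by
  have hmax := pvMax_rotate q j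
  rw [pvRotate_eq_cons q j hj] at hmax ⊢
  rw [hm] at hmax
  unfold pvRot
  simp only [hmax, ne_eq, Option.some.injEq]
  rw [if_pos (fun h => hne h.symm)]
  unfold pvRotate
  rw [List.append_assoc, ← List.take_succ_eq_append_getElem hj]

-- … and leaves the queue alone once the first maximal element is at the front
lemma pvRot_rotate_fix (q : List (Int × Int)) (m : Int)
    (hm : PySem.List.max? (q.map Prod.fst) (fun y => y) = some m)
    (k : Nat) (hk : k < q.length) (hkm : q[k].1 = m) :
    pvRot (pvRotate q k) = pvRotate q k := by
  have hmax := pvMax_rotate q k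
  rw [pvRotate_eq_cons q k hk] at hmax
  rw [pvRotate_eq_cons q k hk]
  rw [hm] at hmax
  unfold pvRot
  simp only [hmax, ne_eq, Option.some.injEq]
  rw [if_neg (by simp [hkm])]

lemma pvFindIdx_lt (q : List (Int × Int)) (m : Int)
    (hm : PySem.List.max? (q.map Prod.fst) (fun y => y) = some m) :
    q.findIdx (fun x => x.1 == m) < q.length := by
  apply List.findIdx_lt_length_of_exists
  have := PySem.List.max?_mem hm
  simp only [List.mem_map] at this
  obtain ⟨x, hx, hfst⟩ := this
  exact ⟨x, hx, by simp [hfst]⟩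

-- A's inner loop rotates the queue to its first maximal element — exactly B's slicing step
lemma pvSort_eq_rotate (q : List (Int × Int)) (m : Int)
    (hm : PySem.List.max? (q.map Prod.fst) (fun y => y) = some m) :
    pvSort q = pvRotate q (q.findIdx (fun x => x.1 == m)) := by
  set k := q.findIdx (fun x => x.1 == m) with hkdef
  have hk : k < q.length := pvFindIdx_lt q m hm
  have key : ∀ n : Nat, (List.range n).foldl (fun acc _ => pvRot acc) q = pvRotate q (min n k) := by
    intro n
    induction n with
    | zero => simp [pvRotate]
    | succ n ih =>
        rw [List.range_succ, List.foldl_append, ih]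
        simp only [List.foldl_cons, List.foldl_nil]
        by_cases hnk : n < k
        · have hmin : min n k = n := by omega
          have hmin' : min (n + 1) k = n + 1 := by omega
          rw [hmin, hmin']
          refine pvRot_rotate_step q m hm n (by omega) ?_
          have := List.not_of_lt_findIdx (by omega : n < q.findIdx (fun x => x.1 == m))
          simpa using this
        · have hmin : min n k = k := by omega
          have hmin' : min (n + 1) k = k := by omega
          rw [hmin, hmin']
          refine pvRot_rotate_fix q m hm k hk ?_
          have := List.findIdx_getElem (w := hk)
          simpa using this
  unfold pvSort
  rw [key q.length]
  congr 1
  omega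

-- lockstep: A's fueled outer loop equals B's fueled loop on the component-swapped queue
lemma pvMain : ∀ (fuel : Nat) (q : List (Int × Int)) (location answer : Int),
    q.length = fuel →
    pvOuter fuel q location answer = pvAltLoop fuel (q.map Prod.swap) location answer := by
  intro fuel
  induction fuel with
  | zero => intro q location answer h; rfl
  | succ fuel ih =>
    intro q location answer h
    match q with
    | [] => simp at h
    | y :: t =>
      obtain ⟨m, hm⟩ : ∃ m, PySem.List.max? ((y :: t).map Prod.fst) (fun v => v) = some m := by
        cases hmq : PySem.List.max? ((y :: t).map Prod.fst) (fun v => v) with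
        | none => rw [PySem.List.max?_eq_none_iff] at hmq; simp at hmq
        | some m => exact ⟨m, rfl⟩
      have hk : (y :: t).findIdx (fun x => x.1 == m) < (y :: t).length := pvFindIdx_lt _ m hm
      set k := (y :: t).findIdx (fun x => x.1 == m) with hkdef
      -- B's intermediate quantities coincide with A's
      have hsnd : ((y :: t).map Prod.swap).map Prod.snd = (y :: t).map Prod.fst := by
        rw [List.map_map]; rfl
      have hfind : ((y :: t).map Prod.swap).findIdx (fun x => x.2 == m) = k := by
        rw [List.findIdx_map]; rfl
      have hgetd : (((y :: t).map Prod.swap).getD k (0, 0)).1 = ((y :: t)[k]'hk).2 := by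
        rw [List.getD_eq_getElem _ _ (by simpa using hk)]
        simp only [List.getElem_map, Prod.fst_swap]
      -- reduce A's step
      rw [show pvOuter (fuel + 1) (y :: t) location answer =
            (match pvSort (y :: t) with
             | [] => answer
             | process :: rest =>
                 if process.2 == location then answer + 1
                 else pvOuter fuel rest location (answer + 1)) from rfl]
      rw [pvSort_eq_rotate _ m hm, ← hkdef, pvRotate_eq_cons _ k hk]
      -- reduce B's step
      conv_rhs => rw [List.map_cons]
      rw [show pvAltLoop (fuel + 1) (Prod.swap y :: t.map Prod.swap) location answer =
            (let q := Prod.swap y :: t.map Prod.swap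
             let m' := (PySem.List.max? (q.map Prod.snd) (fun v => v)).getD 0
             let k' := q.findIdx (fun x => x.2 == m')
             let i := (q.getD k' (0, 0)).1
             let q' := q.drop (k' + 1) ++ q.take k'
             if i == location then answer + 1 else pvAltLoop fuel q' location (answer + 1)) from rfl]
      simp only [← List.map_cons]
      rw [hsnd, hm]
      simp only [Option.getD_some]
      rw [hfind, hgetd]
      rw [← List.map_drop, ← List.map_take, ← List.map_append]
      by_cases hloc : ((y :: t)[k]'hk).2 = location
      · simp [hloc]
      · simp only [beq_iff_eq, hloc, if_false]
        refine ih _ location (answer + 1) ?_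
        have hk' : k < t.length + 1 := by simpa using hk
        have h' : t.length + 1 = fuel + 1 := by simpa using h
        simp only [List.length_append, List.length_drop, List.length_take, List.length_cons]
        omega

-- A's initial queue is B's enumerate with the pair components swapped
lemma pvInit (priorities : List Int) :
    (PySem.List.pyRange 0 (priorities.length : Int) 1).foldl
      (fun acc i => acc ++ [(PySem.List.pyGetD priorities i 0, i)]) ([] : List (Int × Int)) =
    (PySem.List.enumerate priorities 0).map Prod.swap := by
  rw [PySem.List.foldl_append_singleton_eq_map]
  rw [PySem.List.enumerate_eq_map_pyRange (d := 0), List.map_map]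
  simp only [PySem.List.len_eq, List.nil_append]
  rfl

-- ===== VERDICT (by name: the statement is the Claim_ definition above) =====
theorem solution_spec : Claim_equal_solution := by
  intro priorities location _
  unfold Spec_solution solution solution_alt
  rw [pvInit, pvMain priorities.length ((PySem.List.enumerate priorities 0).map Prod.swap)]
  · simp
  · simp [PySem.List.length_enumerate]
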